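-- pv_equiv track=rewrite | github.com/cetrl/ada-tech-school | train/17_demineur/demineur.py | replace_empty
-- ===== SOURCE A (Python) =====
-- def replace_empty(grid, c):
--     m = len(grid)  # number of rows
--     n = len(grid[0])  # number of columns
--     for i in c:
--         row = i // n
--         col = i % n
--         if 0 <= row < m and 0 <= col < n:  # Check if within bounds
--             if grid[row][col] == 0:
--                 grid[row][col] = 1
--     return grid
-- ===== SOURCE B (Python) =====
-- def replace_empty(grid, c):
--     n = len(grid[0])  # number of columns
--     targets = set(c)
--     return [[1 if col < n and row * n + col in targets and v == 0 else v
--              for col, v in enumerate(r)]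
--             for row, r in enumerate(grid)]
-- ===== Notes on version B (the rewrite author's own statement) =====
-- stated objective: alternative
-- what changed: Instead of iterating the index list and mutating grid cells in place, B builds a set of target indices once and rebuilds the grid in one row-major enumerate pass, deciding each cell by set membership; equivalence is about the return value (A mutates its argument, B does not).
import Mathlib
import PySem

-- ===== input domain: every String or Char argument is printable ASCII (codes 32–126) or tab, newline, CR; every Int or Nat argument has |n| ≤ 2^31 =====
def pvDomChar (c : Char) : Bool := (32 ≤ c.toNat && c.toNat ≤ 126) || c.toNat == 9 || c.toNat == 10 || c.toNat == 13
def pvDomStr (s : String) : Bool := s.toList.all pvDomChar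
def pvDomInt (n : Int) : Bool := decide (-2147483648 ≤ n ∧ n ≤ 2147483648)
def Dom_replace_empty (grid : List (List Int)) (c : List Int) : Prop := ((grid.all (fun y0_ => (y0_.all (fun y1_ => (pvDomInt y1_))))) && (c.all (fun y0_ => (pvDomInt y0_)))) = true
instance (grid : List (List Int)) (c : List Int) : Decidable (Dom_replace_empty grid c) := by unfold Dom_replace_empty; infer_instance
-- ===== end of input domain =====

-- B rebuilds the grid in one enumerate pass testing membership in a set of target indices,
-- instead of iterating the index list and mutating cells (alternative decomposition);
-- the equivalence is about the RETURN value — Python A mutates its argument, Python B does not.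

-- ===== PORT A =====
-- loop body of A's 'for i in c' (extracted as a helper for the fold)
def stepA (m n : Int) (g : List (List Int)) (i : Int) : List (List Int) :=
  let row := PySem.Int.floordiv i n
  let col := PySem.Int.mod i n
  if 0 ≤ row ∧ row < m ∧ 0 ≤ col ∧ col < n then
    if PySem.List.pyGetD (PySem.List.pyGetD g row []) col 0 = 0 then
      PySem.List.pySetD g row (PySem.List.pySetD (PySem.List.pyGetD g row []) col (1 : Int))
    else g
  else g

def replace_empty (grid : List (List Int)) (c : List Int) : List (List Int) :=
  let m : Int := grid.length
  let n : Int := (grid.headD []).length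
  c.foldl (stepA m n) grid

-- ===== PORT B =====
def replace_empty_alt (grid : List (List Int)) (c : List Int) : List (List Int) :=
  let n : Int := (grid.headD []).length
  let targets : PySem.Set Int := PySem.Set.ofList c
  (PySem.List.enumerate grid).map (fun p =>
    (PySem.List.enumerate p.2).map (fun q =>
      if q.1 < n ∧ (p.1 * n + q.1) ∈ targets ∧ q.2 = 0 then (1 : Int) else q.2))

-- ===== PRECONDITION & SPEC =====
-- Pre_ excludes exactly the inputs where Python A raises: empty grid (IndexError on grid[0]),
-- empty first row with a non-empty index list (ZeroDivisionError), and an in-bounds target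
-- index addressing past the end of a shorter (ragged) row (IndexError).
def Pre_replace_empty (grid : List (List Int)) (c : List Int) : Prop :=
  grid ≠ [] ∧
  (c ≠ [] → ((grid.headD []).length : Int) ≠ 0) ∧
  ∀ i ∈ c,
    0 ≤ PySem.Int.floordiv i ((grid.headD []).length : Int) →
    PySem.Int.floordiv i ((grid.headD []).length : Int) < (grid.length : Int) →
    (PySem.Int.mod i ((grid.headD []).length : Int)).toNat <
      (grid.getD (PySem.Int.floordiv i ((grid.headD []).length : Int)).toNat []).length
instance (grid : List (List Int)) (c : List Int) : Decidable (Pre_replace_empty grid c) := by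
  unfold Pre_replace_empty; infer_instance

def pvWitness_replace_empty : List (List Int) × List Int := ([[0, 2], [0, 0]], [0, 3, -1, 7])

def Spec_replace_empty (grid : List (List Int)) (c : List Int) (out : List (List Int)) : Prop := out = replace_empty_alt grid c
instance (grid : List (List Int)) (c : List Int) (out : List (List Int)) : Decidable (Spec_replace_empty grid c out) := by unfold Spec_replace_empty; infer_instance

-- ===== CLAIM (what is proved, stated in full; the proofs are below) =====
def Claim_equal_replace_empty : Prop := ∀ (grid : List (List Int)) (c : List Int), Dom_replace_empty grid c → Pre_replace_empty grid c → Spec_replace_empty grid c (replace_empty grid c)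

-- ===== LEMMAS AND PROOFS =====

theorem getD_set_lemma {α : Type} (l : List α) (k r : Nat) (v d : α) :
    (l.set k v).getD r d = if r = k ∧ k < l.length then v else l.getD r d := by
  simp [List.getD_eq_getElem?_getD, List.getElem?_set]
  split_ifs with h1 h2 h3 <;> simp_all

theorem pyGetD_nonneg_getD {α : Type} (xs : List α) (i : Int) (d : α) (h0 : 0 ≤ i) :
    PySem.List.pyGetD xs i d = xs.getD i.toNat d := by
  by_cases hl : i < (xs.length : Int)
  · rw [PySem.List.pyGetD_eq_getElem _ _ h0 hl, List.getD_eq_getElem _ _ (by omega)]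
  · rw [PySem.List.pyGetD_of_none _ _ _ ((PySem.List.pyGet?_eq_none_iff _ _).2 (by
      simp [PySem.Raise.InRange]; omega)), List.getD_eq_default _ _ (by omega)]

theorem stepA_length (m n : Int) (g : List (List Int)) (i : Int) :
    (stepA m n g i).length = g.length := by
  simp only [stepA]
  split_ifs with h1 h2 <;> simp [PySem.List.length_pySetD]

theorem stepA_rowlen (m n : Int) (g : List (List Int)) (i : Int) (r : Nat) :
    ((stepA m n g i).getD r []).length = (g.getD r []).length := by
  simp only [stepA]
  split_ifs with h1 h2
  · rw [PySem.List.pySetD_of_nonneg _ _ h1.1, getD_set_lemma]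
    split_ifs with h3
    · have hlt : PySem.Int.floordiv i n < (g.length : Int) := by omega
      rw [PySem.List.length_pySetD, PySem.List.pyGetD_eq_getElem _ _ h1.1 hlt, h3.1,
        List.getD_eq_getElem _ _ h3.2]
    · rfl
  · rfl
  · rfl

theorem stepA_cell (m n : Int) (g : List (List Int)) (i : Int)
    (hn : 0 < n) (hm : m = (g.length : Int))
    (hacc : 0 ≤ PySem.Int.floordiv i n → PySem.Int.floordiv i n < m →
      (PySem.Int.mod i n).toNat < (g.getD (PySem.Int.floordiv i n).toNat []).length)
    (r cc : Nat) (hr : r < g.length) (hcc : cc < (g.getD r []).length) :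
    ((stepA m n g i).getD r []).getD cc 0 =
      if ((cc : Int) < n ∧ (r : Int) * n + (cc : Int) = i ∧ (g.getD r []).getD cc 0 = 0)
      then 1 else (g.getD r []).getD cc 0 := by
  have hc0 : 0 ≤ PySem.Int.mod i n := by
    rw [PySem.Int.mod_eq_emod_of_pos hn]; exact Int.emod_nonneg i (by omega)
  have hcn : PySem.Int.mod i n < n := by
    rw [PySem.Int.mod_eq_emod_of_pos hn]; exact Int.emod_lt_of_pos i hn
  have hsum := PySem.Int.floordiv_mul_add_mod i n
  simp only [stepA]
  by_cases hit : ((cc : Int) < n ∧ (r : Int) * n + (cc : Int) = i)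
  · obtain ⟨hccn, hieq⟩ := hit
    have hrow : PySem.Int.floordiv i n = (r : Int) := by
      rw [PySem.Int.floordiv_eq_iff_of_pos hn]
      constructor
      · linarith [Int.natCast_nonneg cc]
      · nlinarith
    have hcol : PySem.Int.mod i n = (cc : Int) := by
      rw [hrow] at hsum; linarith
    simp only [hrow, hcol, PySem.List.pyGetD_natCast, PySem.List.pySetD_natCast]
    rw [if_pos ⟨Int.natCast_nonneg r, by omega, Int.natCast_nonneg cc, hccn⟩]
    by_cases hv : (g.getD r []).getD cc 0 = 0
    · rw [if_pos hv, if_pos ⟨hccn, hieq, hv⟩, getD_set_lemma]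
      rw [if_pos ⟨rfl, hr⟩, getD_set_lemma, if_pos ⟨rfl, hcc⟩]
    · rw [if_neg hv, if_neg (by tauto)]
  · have hR : ¬((cc : Int) < n ∧ (r : Int) * n + (cc : Int) = i ∧ (g.getD r []).getD cc 0 = 0) := by
      tauto
    rw [if_neg hR]
    split_ifs with hg hv
    · obtain ⟨h0, hlm, _, _⟩ := hg
      have hfl : (PySem.Int.floordiv i n).toNat < g.length := by omega
      have hcl := hacc h0 hlm
      rw [PySem.List.pySetD_of_nonneg _ _ h0, getD_set_lemma]
      split_ifs with h3
      · rw [PySem.List.pySetD_of_nonneg _ _ hc0, getD_set_lemma]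
        split_ifs with h4
        · exfalso
          apply hit
          have h5 : PySem.Int.floordiv i n = (r : Int) := by omega
          have h6 : PySem.Int.mod i n = (cc : Int) := by omega
          constructor
          · omega
          · rw [h5, h6] at hsum; linarith
        · rw [pyGetD_nonneg_getD _ _ _ h0, ← h3.1]
      · rfl
    · rfl
    · rfl

theorem foldA_cell (n : Int) (hn : 0 < n) (c : List Int) :
    ∀ (g : List (List Int)) (m : Int), m = (g.length : Int) →
    (∀ i ∈ c, 0 ≤ PySem.Int.floordiv i n → PySem.Int.floordiv i n < m →
      (PySem.Int.mod i n).toNat < (g.getD (PySem.Int.floordiv i n).toNat []).length) →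
    (c.foldl (stepA m n) g).length = g.length ∧
    (∀ r, ((c.foldl (stepA m n) g).getD r []).length = (g.getD r []).length) ∧
    (∀ r cc : Nat, r < g.length → cc < (g.getD r []).length →
      ((c.foldl (stepA m n) g).getD r []).getD cc 0 =
        if ((cc : Int) < n ∧ ((r : Int) * n + (cc : Int)) ∈ c ∧ (g.getD r []).getD cc 0 = 0)
        then 1 else (g.getD r []).getD cc 0) := by
  induction c with
  | nil => intro g m hm hacc; simp
  | cons i c' ih =>
    intro g m hm hacc
    simp only [List.foldl_cons]
    have hm' : m = ((stepA m n g i).length : Int) := by rw [stepA_length]; exact hm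
    have hacc' : ∀ j ∈ c', 0 ≤ PySem.Int.floordiv j n → PySem.Int.floordiv j n < m →
        (PySem.Int.mod j n).toNat <
          ((stepA m n g i).getD (PySem.Int.floordiv j n).toNat []).length := by
      intro j hj h0 h1
      rw [stepA_rowlen]
      exact hacc j (List.mem_cons_of_mem _ hj) h0 h1
    obtain ⟨L1, L2, L3⟩ := ih (stepA m n g i) m hm' hacc'
    refine ⟨by rw [L1, stepA_length], fun r => by rw [L2, stepA_rowlen], ?_⟩
    intro r cc hr hcc
    have hr' : r < (stepA m n g i).length := by rw [stepA_length]; exact hr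
    have hcc' : cc < ((stepA m n g i).getD r []).length := by rw [stepA_rowlen]; exact hcc
    rw [L3 r cc hr' hcc',
      stepA_cell m n g i hn hm (hacc i List.mem_cons_self) r cc hr hcc]
    by_cases hX : ((cc : Int) < n ∧ (r : Int) * n + (cc : Int) = i ∧ (g.getD r []).getD cc 0 = 0)
    · rw [if_pos hX, if_neg (by simp), if_pos ⟨hX.1, by simp [hX.2.1], hX.2.2⟩]
    · rw [if_neg hX]
      by_cases hY : ((cc : Int) < n ∧ ((r : Int) * n + (cc : Int)) ∈ c' ∧ (g.getD r []).getD cc 0 = 0)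
      · rw [if_pos hY, if_pos ⟨hY.1, List.mem_cons_of_mem _ hY.2.1, hY.2.2⟩]
      · rw [if_neg hY, if_neg ?_]
        intro h
        rcases List.mem_cons.1 h.2.1 with h' | h'
        · exact hX ⟨h.1, h', h.2.2⟩
        · exact hY ⟨h.1, h', h.2.2⟩

theorem enum_map_getD {α β : Type} (xs : List α) (f : Int × α → β) (r : Nat) (d : β)
    (hr : r < xs.length) :
    ((PySem.List.enumerate xs).map f).getD r d = f ((r : Int), xs[r]) := by
  rw [List.getD_eq_getElem?_getD, List.getElem?_map, PySem.List.getElem?_enumerate]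
  simp [List.getElem?_eq_getElem hr]

theorem enum_map_getD_ge {α β : Type} (xs : List α) (f : Int × α → β) (r : Nat) (d : β)
    (hr : xs.length ≤ r) :
    ((PySem.List.enumerate xs).map f).getD r d = d := by
  rw [List.getD_eq_default]
  simp [PySem.List.length_enumerate, hr]

theorem alt_cell (grid : List (List Int)) (c : List Int) :
    (replace_empty_alt grid c).length = grid.length ∧
    (∀ r, ((replace_empty_alt grid c).getD r []).length = (grid.getD r []).length) ∧
    (∀ r cc : Nat, r < grid.length → cc < (grid.getD r []).length →
      ((replace_empty_alt grid c).getD r []).getD cc 0 =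
        if ((cc : Int) < ((grid.headD []).length : Int) ∧
            ((r : Int) * ((grid.headD []).length : Int) + (cc : Int)) ∈ c ∧
            (grid.getD r []).getD cc 0 = 0)
        then 1 else (grid.getD r []).getD cc 0) := by
  refine ⟨by simp [replace_empty_alt, PySem.List.length_enumerate], ?_, ?_⟩
  · intro r
    by_cases hr : r < grid.length
    · simp only [replace_empty_alt]
      rw [enum_map_getD _ _ r [] hr, List.getD_eq_getElem _ _ hr]
      simp [PySem.List.length_enumerate]
    · simp only [replace_empty_alt]
      rw [enum_map_getD_ge _ _ r [] (by omega), List.getD_eq_default _ _ (by omega)]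
  · intro r cc hr hcc
    simp only [replace_empty_alt]
    rw [enum_map_getD _ _ r [] hr, enum_map_getD _ _ cc 0
      (by rw [List.getD_eq_getElem _ _ hr] at hcc; exact hcc)]
    have hcc' : cc < grid[r].length := by rw [List.getD_eq_getElem _ _ hr] at hcc; exact hcc
    simp only [PySem.Set.mem_ofList, List.getD_eq_getElem _ _ hr, List.getD_eq_getElem _ _ hcc']

theorem lists_eq (as bs : List (List Int))
    (hlen : as.length = bs.length)
    (hrow : ∀ r, (as.getD r []).length = (bs.getD r []).length)
    (hcell : ∀ r cc : Nat, r < as.length → cc < (as.getD r []).length →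
      (as.getD r []).getD cc 0 = (bs.getD r []).getD cc 0) :
    as = bs := by
  apply List.ext_getElem hlen
  intro r h1 h2
  apply List.ext_getElem
  · have := hrow r
    rwa [List.getD_eq_getElem _ _ h1, List.getD_eq_getElem _ _ h2] at this
  · intro cc hc1 hc2
    have := hcell r cc h1 (by rw [List.getD_eq_getElem _ _ h1]; exact hc1)
    rwa [List.getD_eq_getElem _ _ h1, List.getD_eq_getElem _ _ h2,
      List.getD_eq_getElem _ _ hc1, List.getD_eq_getElem _ _ hc2] at this

-- ===== VERDICT (by name: the statement is the Claim_ definition above) =====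
theorem replace_empty_spec : Claim_equal_replace_empty := by
  unfold Claim_equal_replace_empty Spec_replace_empty
  intro grid c _ hpre
  obtain ⟨hne, hn0, hacc⟩ := hpre
  simp only [replace_empty]
  by_cases hc : c = []
  · subst hc
    simp only [List.foldl_nil]
    obtain ⟨B1, B2, B3⟩ := alt_cell grid []
    refine lists_eq _ _ B1.symm (fun r => (B2 r).symm) (fun r cc h1 h2 => ?_)
    rw [B3 r cc h1 h2, if_neg (by simp)]
  · have hnpos : 0 < ((grid.headD []).length : Int) := by
      have := hn0 hc
      have h2 : (0 : Int) ≤ ((grid.headD []).length : Int) := Int.natCast_nonneg _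
      omega
    obtain ⟨A1, A2, A3⟩ := foldA_cell _ hnpos c grid _ rfl hacc
    obtain ⟨B1, B2, B3⟩ := alt_cell grid c
    apply lists_eq
    · rw [A1, B1]
    · intro r; rw [A2 r, B2 r]
    · intro r cc h1 h2
      have h1' : r < grid.length := by rwa [A1] at h1
      have h2' : cc < (grid.getD r []).length := by rwa [A2 r] at h2
      rw [A3 r cc h1' h2', B3 r cc h1' h2']
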